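-- pv_equiv track=rewrite | github.com/ylunaliu/Inflation | utiles.py | marginals_expressible_full
-- ===== SOURCE A (Python) =====
-- import itertools
--
-- def marginals_expressible_full(marginals, length):
--     """
--     Description: Given separate marginals of the injectable set in an expressible set, give the full
--                  combination of the marginals for that expressible set
--
--     Parameters:
--     ------------
--     marginals: A list contain arrays of the marginals for the injectable sets in the expressible sets, I made the assumption
--                here an expressible set need to have at least 2 injectable sets
--     length: The length of the expressible sets. Or the number of injectable sets inside the expressible set
--
--     Return:
--     ------------
--     marginal: A list of lists contain all the marginal given an expressible set
--     """
--     marginal = marginals[0]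
--     for i in range(length-1):
--         all_combinations = list(itertools.product(marginal, marginals[i+1]))
--         supports = []
--         for combination in all_combinations:
--             chain = list(itertools.chain.from_iterable(combination))
--             supports.append(chain)
--         marginal = supports
--
--     return marginal
-- ===== SOURCE B (Python) =====
-- import itertools
--
-- def marginals_expressible_full(marginals, length):
--     if length < 2:
--         return marginals[0]
--     return [list(itertools.chain.from_iterable(combo))
--             for combo in itertools.product(*marginals[:length])]
-- ===== Notes on version B (the rewrite author's own statement) =====
-- stated objective: simpler
-- what changed: Replaces the iterated pairwise product with repeated rebuilding of intermediate supports lists by a single N-ary itertools.product over the first `length` marginals, flattening each combination once in a comprehension (with a length<2 guard returning marginals[0] unchanged, as A does).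
import Mathlib
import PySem

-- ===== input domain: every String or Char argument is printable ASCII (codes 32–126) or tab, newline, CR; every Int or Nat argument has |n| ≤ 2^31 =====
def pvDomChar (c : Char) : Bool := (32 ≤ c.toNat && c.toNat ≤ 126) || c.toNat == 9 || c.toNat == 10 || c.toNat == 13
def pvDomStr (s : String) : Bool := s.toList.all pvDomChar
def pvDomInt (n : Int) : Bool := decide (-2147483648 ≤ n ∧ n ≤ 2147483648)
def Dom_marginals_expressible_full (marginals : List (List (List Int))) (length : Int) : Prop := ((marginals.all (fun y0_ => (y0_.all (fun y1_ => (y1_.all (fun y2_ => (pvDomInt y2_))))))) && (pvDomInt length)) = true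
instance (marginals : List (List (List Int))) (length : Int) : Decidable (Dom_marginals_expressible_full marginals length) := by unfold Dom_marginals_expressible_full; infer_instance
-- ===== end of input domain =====

-- B replaces A's iterated pairwise product (rebuilding an intermediate supports list per step)
-- by one N-ary cartesian product over the first `length` marginals, flattened once (objective: simpler).


-- ===== PORT A =====
def marginals_expressible_full (marginals : List (List (List Int))) (length : Int) : List (List Int) :=
  (PySem.List.pyRange 0 (length - 1) 1).foldl
    (fun marginal i =>
      -- all_combinations = list(itertools.product(marginal, marginals[i+1]))
      let allCombinations :=
        marginal.flatMap (fun m => (PySem.List.pyGetD marginals (i + 1) []).map (fun x => (m, x)))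
      -- supports = []; for combination in all_combinations: supports.append(chain)
      allCombinations.foldl (fun supports c => supports ++ [c.1 ++ c.2]) [])
    (PySem.List.pyGetD marginals 0 [])

-- ===== PORT B =====
-- itertools.product(*lists): leftmost factor varies slowest
def pvProd : List (List (List Int)) → List (List (List Int))
  | [] => [[]]
  | l :: ls => l.flatMap (fun x => (pvProd ls).map (fun c => x :: c))

def marginals_expressible_full_alt (marginals : List (List (List Int))) (length : Int) : List (List Int) :=
  if length < 2 then PySem.List.pyGetD marginals 0 []
  else (pvProd (PySem.List.slice marginals none (some length))).map (fun c => c.flatten)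

-- ===== PRECONDITION & SPEC =====
-- Pre_ excludes exactly the inputs where A raises IndexError: empty marginals, or length exceeding the number of marginals.
def Pre_marginals_expressible_full (marginals : List (List (List Int))) (length : Int) : Prop :=
  marginals ≠ [] ∧ length ≤ (marginals.length : Int)
instance (marginals : List (List (List Int))) (length : Int) : Decidable (Pre_marginals_expressible_full marginals length) := by unfold Pre_marginals_expressible_full; infer_instance
def pvWitness_marginals_expressible_full : List (List (List Int)) × Int := ([[[1, 2], [3]], [[4], [5, 6]]], 2)

def Spec_marginals_expressible_full (marginals : List (List (List Int))) (length : Int) (out : List (List Int)) : Prop := out = marginals_expressible_full_alt marginals length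
instance (marginals : List (List (List Int))) (length : Int) (out : List (List Int)) : Decidable (Spec_marginals_expressible_full marginals length out) := by unfold Spec_marginals_expressible_full; infer_instance

-- ===== CLAIM (what is proved, stated in full; the proofs are below) =====
def Claim_equal_marginals_expressible_full : Prop := ∀ (marginals : List (List (List Int))) (length : Int), Dom_marginals_expressible_full marginals length → Pre_marginals_expressible_full marginals length → Spec_marginals_expressible_full marginals length (marginals_expressible_full marginals length)

-- ===== LEMMAS AND PROOFS =====

-- one step of A's loop, simplified: supports = [m ++ x for m in marginal for x in nxt]
theorem pvStepA (marginal nxt : List (List Int)) :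
    (marginal.flatMap (fun m => nxt.map (fun x => (m, x)))).foldl
        (fun supports c => supports ++ [c.1 ++ c.2]) []
      = marginal.flatMap (fun m => nxt.map (fun x => m ++ x)) := by
  rw [PySem.List.foldl_append_singleton_eq_map]
  simp [List.map_flatMap, List.map_map, Function.comp_def]

-- A's whole loop over an explicit list of factors
def pvStepFold (acc : List (List Int)) (L : List (List (List Int))) : List (List Int) :=
  L.foldl (fun marginal nxt => marginal.flatMap (fun m => nxt.map (fun x => m ++ x))) acc

theorem pvStepFold_eq (L : List (List (List Int))) (acc : List (List Int)) :
    pvStepFold acc L = acc.flatMap (fun m => (pvProd L).map (fun c => m ++ c.flatten)) := by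
  induction L generalizing acc with
  | nil => simp [pvStepFold, pvProd]
  | cons nxt ls ih =>
    simp only [pvStepFold, List.foldl_cons] at *
    rw [ih]
    simp [pvProd, List.flatMap_assoc, List.flatMap_map, List.map_flatMap, List.map_map,
      Function.comp_def, List.flatten_cons, List.append_assoc]

-- index bridge: A's range-indexed loop equals pvStepFold over the prefix of the tail
theorem pvBridge (k : Nat) (m0 : List (List Int)) (rest : List (List (List Int)))
    (hk : k ≤ rest.length) (acc : List (List Int)) :
    (PySem.List.pyRange 0 (k : Int) 1).foldl
        (fun marginal i =>
          marginal.flatMap (fun m =>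
            (PySem.List.pyGetD (m0 :: rest) (i + 1) []).map (fun x => m ++ x))) acc
      = pvStepFold acc (rest.take k) := by
  induction k with
  | zero => simp [PySem.List.pyRange_one_eq_nil, pvStepFold]
  | succ k ih =>
    have h1 : ((k + 1 : Nat) : Int) = (k : Int) + 1 := by push_cast; ring
    rw [h1, PySem.List.pyRange_one_succ_right (by positivity), List.foldl_append, ih (by omega)]
    have hkl : k < rest.length := by omega
    have hget : PySem.List.pyGetD (m0 :: rest) ((k : Int) + 1) [] = rest[k] := by
      have : ((k : Int) + 1) = ((k + 1 : Nat) : Int) := by push_cast; ring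
      rw [this, PySem.List.pyGetD_natCast]
      simp [List.getD, List.getElem?_cons_succ, List.getElem?_eq_getElem hkl]
    rw [List.take_add_one, List.getElem?_eq_getElem hkl]
    simp only [List.foldl_cons, Option.toList_some]
    unfold pvStepFold
    rw [List.foldl_append]
    simp [hget]

-- ===== VERDICT (by name: the statement is the Claim_ definition above) =====
theorem marginals_expressible_full_spec : Claim_equal_marginals_expressible_full := by
  intro marginals length _ hPre
  obtain ⟨hne, hlen⟩ := hPre
  unfold Spec_marginals_expressible_full marginals_expressible_full marginals_expressible_full_alt
  by_cases h2 : length < 2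
  · rw [if_pos h2, PySem.List.pyRange_one_eq_nil (by omega)]
    simp
  · rw [if_neg h2]
    obtain ⟨m0, rest, rfl⟩ : ∃ m0 rest, marginals = m0 :: rest := by
      cases marginals with
      | nil => exact absurd rfl hne
      | cons a l => exact ⟨a, l, rfl⟩
    obtain ⟨n, rfl⟩ : ∃ n : Nat, length = (n : Int) := ⟨length.toNat, by omega⟩
    have hn2 : 2 ≤ n := by omega
    have hnl : n ≤ (m0 :: rest).length := by exact_mod_cast hlen
    have hsl : PySem.List.slice (m0 :: rest) none (some (n : Int)) = m0 :: rest.take (n - 1) := by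
      rw [PySem.List.slice_to_natCast]
      cases n with
      | zero => omega
      | succ m => simp [List.take_succ_cons]
    have hrange : (n : Int) - 1 = ((n - 1 : Nat) : Int) := by omega
    have hbody :
        (fun (marginal : List (List Int)) (i : Int) =>
            let allCombinations := marginal.flatMap (fun m =>
              (PySem.List.pyGetD (m0 :: rest) (i + 1) []).map (fun x => (m, x)))
            allCombinations.foldl (fun supports c => supports ++ [c.1 ++ c.2]) [])
          = (fun (marginal : List (List Int)) (i : Int) =>
              marginal.flatMap (fun m =>
                (PySem.List.pyGetD (m0 :: rest) (i + 1) []).map (fun x => m ++ x))) := by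
      funext marginal i
      exact pvStepA marginal (PySem.List.pyGetD (m0 :: rest) (i + 1) [])
    rw [hbody, hrange, pvBridge (n - 1) m0 rest (by simp at hnl; omega),
      pvStepFold_eq, hsl]
    simp [pvProd, List.map_flatMap, List.map_map, Function.comp_def, List.flatten_cons]
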